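-- pv_equiv track=rewrite | github.com/timoast/sinto | sinto/filterbarcodes.py | scan_tags
-- ===== SOURCE A (Python) =====
-- def scan_tags(tags, cb="CB", ub="UB"):
--     """
--     Input bam tags
--     Return UMI and cell barcode sequences
--
--     Parameters
--     ----------
--     tags
--         List of read tags
--     cb : str
--         Tag for cell barcode. Default is CB, as used by 10x
--     ub : str
--         Tag for UMI barcode. Default is UB, as used by 10x
--     """
--     cell_barcode = None
--     umi = None
--     for tag in tags:
--         if tag[0] == cb:
--             cell_barcode = tag[1]
--         elif tag[0] == ub:
--             umi = tag[1]
--         else: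
--             pass
--     return cell_barcode, umi
-- ===== SOURCE B (Python) =====
-- def scan_tags(tags, cb="CB", ub="UB"):
--     """
--     Input bam tags
--     Return UMI and cell barcode sequences
--     """
--     def last_value(key):
--         # last occurrence wins = first match scanning back-to-front, early exit
--         for tag in reversed(tags):
--             if tag[0] == key:
--                 return tag[1]
--         return None
--     return last_value(cb), last_value(ub)
-- ===== Notes on version B (the rewrite author's own statement) =====
-- stated objective: alternative
-- what changed: Replaces A's single forward pass that maintains two mutable result variables with two independent back-to-front searches that return on the first match (last occurrence wins by traversal order, not by overwriting).
-- outside the precondition, e.g. on scan_tags([('CB', 'AAA')], 'CB', 'CB'): A returns ('AAA', None), B returns ('AAA', 'AAA')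
import Mathlib
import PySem

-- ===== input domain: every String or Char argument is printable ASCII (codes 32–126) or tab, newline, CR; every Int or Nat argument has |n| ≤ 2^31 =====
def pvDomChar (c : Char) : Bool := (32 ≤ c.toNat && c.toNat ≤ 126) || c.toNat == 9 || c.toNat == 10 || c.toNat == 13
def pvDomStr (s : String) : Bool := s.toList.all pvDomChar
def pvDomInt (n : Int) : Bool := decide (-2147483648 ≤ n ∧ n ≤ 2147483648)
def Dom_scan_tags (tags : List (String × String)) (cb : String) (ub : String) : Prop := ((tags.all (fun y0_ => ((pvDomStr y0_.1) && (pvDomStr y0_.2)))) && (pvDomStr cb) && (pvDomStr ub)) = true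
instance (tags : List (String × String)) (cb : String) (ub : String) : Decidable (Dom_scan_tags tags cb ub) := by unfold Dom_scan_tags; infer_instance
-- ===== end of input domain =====

-- B replaces A's forward branching scan keeping two mutable variables by two independent
-- back-to-front first-match searches (alternative decomposition, same O(n) cost).


-- ===== PORT A =====
def scan_tags (tags : List (String × String)) (cb : String) (ub : String) : Option String × Option String :=
  tags.foldl
    (fun st tag =>
      if tag.1 == cb then (some tag.2, st.2)
      else if tag.1 == ub then (st.1, some tag.2)
      else st)
    (none, none)

-- ===== PORT B =====
-- 'for tag in reversed(tags): if tag[0] == key: return tag[1]' = first match on the reversed list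
def scan_tags_alt (tags : List (String × String)) (cb : String) (ub : String) : Option String × Option String :=
  let lastValue := fun (key : String) => (tags.reverse.find? (fun tag => tag.1 == key)).map (·.2)
  (lastValue cb, lastValue ub)

-- ===== PRECONDITION & SPEC =====
-- Pre_ excludes the degenerate corner cb = ub with a tag carrying that key: there A's elif never
-- fires (umi stays None) while B's two searches both find the value — both behaviours are
-- defensible on this unspecified corner, so it lies outside the claim.
def Pre_scan_tags (tags : List (String × String)) (cb : String) (ub : String) : Prop :=
  cb = ub → ∀ t ∈ tags, t.1 ≠ cb
instance (tags : List (String × String)) (cb : String) (ub : String) : Decidable (Pre_scan_tags tags cb ub) := by unfold Pre_scan_tags; infer_instance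
def pvWitness_scan_tags : (List (String × String)) × String × String :=
  ([("CB", "AAACCC"), ("UB", "TTT")], "CB", "UB")
def Spec_scan_tags (tags : List (String × String)) (cb : String) (ub : String) (out : Option String × Option String) : Prop := out = scan_tags_alt tags cb ub
instance (tags : List (String × String)) (cb : String) (ub : String) (out : Option String × Option String) : Decidable (Spec_scan_tags tags cb ub out) := by unfold Spec_scan_tags; infer_instance

-- ===== CLAIM (what is proved, stated in full; the proofs are below) =====
def Claim_equal_scan_tags : Prop := ∀ (tags : List (String × String)) (cb : String) (ub : String), Dom_scan_tags tags cb ub → Pre_scan_tags tags cb ub → Spec_scan_tags tags cb ub (scan_tags tags cb ub)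

-- ===== LEMMAS AND PROOFS =====
lemma scan_fold_eq_rev_find (cb ub : String) (tags : List (String × String)) :
    (cb = ub → ∀ t ∈ tags, t.1 ≠ cb) →
    ∀ (c u : Option String),
      tags.foldl
        (fun st tag =>
          if tag.1 == cb then (some tag.2, st.2)
          else if tag.1 == ub then (st.1, some tag.2)
          else st) (c, u)
      = (((tags.reverse.find? (fun tag => tag.1 == cb)).map (·.2)).or c,
         ((tags.reverse.find? (fun tag => tag.1 == ub)).map (·.2)).or u) := by
  induction tags using List.reverseRecOn with
  | nil => intro _ c u; simp
  | append_singleton rest t ih =>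
    intro hpre c u
    have hpre' : cb = ub → ∀ t' ∈ rest, t'.1 ≠ cb :=
      fun heq t' ht' => hpre heq t' (by simp [ht'])
    rw [List.foldl_append, ih hpre' c u]
    simp only [List.foldl_cons, List.foldl_nil, List.reverse_append,
      List.reverse_singleton, List.singleton_append, List.find?_cons]
    by_cases h1 : t.1 = cb
    · have hne : cb ≠ ub := fun heq => (hpre heq t (by simp)) h1
      have e1 : (t.1 == cb) = true := beq_iff_eq.mpr h1
      have e2 : (cb == ub) = false := beq_eq_false_iff_ne.mpr hne
      rw [if_pos e1]
      simp [h1, e2]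
    · by_cases h2 : t.1 = ub
      · have e1 : (t.1 == cb) = false := beq_eq_false_iff_ne.mpr h1
        have e2 : (t.1 == ub) = true := beq_iff_eq.mpr h2
        have e3 : (ub == cb) = false := beq_eq_false_iff_ne.mpr (h2 ▸ h1)
        rw [if_neg (by simp [e1]), if_pos e2]
        simp [h2, e3]
      · have e1 : (t.1 == cb) = false := beq_eq_false_iff_ne.mpr h1
        have e2 : (t.1 == ub) = false := beq_eq_false_iff_ne.mpr h2
        rw [if_neg (by simp [e1]), if_neg (by simp [e2])]
        simp [e1, e2]

-- ===== VERDICT (by name: the statement is the Claim_ definition above) =====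
theorem scan_tags_spec : Claim_equal_scan_tags := by
  intro tags cb ub _ hpre
  unfold Spec_scan_tags scan_tags scan_tags_alt
  simpa using scan_fold_eq_rev_find cb ub tags hpre none none
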